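-- pv_equiv track=rewrite | github.com/raja1106/Leetcode | backtracking/282. Expression Add Operators.py | countOperators
-- ===== SOURCE A (Python) =====
-- def countOperators(num: str, target: int) -> int:
--     n = len(num)
--     memo = {}  # Key: (index, current_sum, previous_value) -> Value: count of valid expressions
--
--     def dfs(index: int, current_sum: int, previous_value: int) -> int:
--         """
--         Returns how many valid expressions can be formed from num[index:]
--         such that the overall expression value becomes 'target' when
--         combined with the partial expression leading to (current_sum, previous_value).
--         """
--
--         # If we've consumed all digits, check if we matched the target
--         if index == n:
--             return 1 if current_sum == target else 0
--
--         # Check memo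
--         key = (index, current_sum, previous_value)
--         if key in memo:
--             return memo[key]
--
--         total_count = 0
--         # Try all possible splits for the next number
--         for j in range(index, n):
--             # Skip multi-digit numbers with leading '0'
--             if j > index and num[index] == '0':
--                 break
--
--             current_num_str = num[index:j+1]
--             current_num = int(current_num_str)
--
--             # If this is the first number (no operator yet), just initialize
--             if index == 0:
--                 total_count += dfs(j+1, current_num, current_num)
--             else:
--                 # Addition
--                 total_count += dfs(j+1, current_sum + current_num, current_num)
--
--                 # Subtraction
--                 total_count += dfs(j+1, current_sum - current_num, -current_num)
--
--                 # Multiplication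
--                 # Undo the previous_value in current_sum, then add (previous_value * current_num)
--                 new_sum = current_sum - previous_value + (previous_value * current_num)
--                 total_count += dfs(j + 1, new_sum, previous_value * current_num)
--
--                 # Division (only if current_num != 0 and it divides evenly)
--                 if current_num != 0 and previous_value % current_num == 0:
--                     new_factor = previous_value // current_num
--                     new_sum = current_sum - previous_value + new_factor
--                     total_count += dfs(j+1, new_sum, new_factor)
--
--         memo[key] = total_count
--         return total_count
--
--     return dfs(0, 0, 0)
-- ===== SOURCE B (Python) =====
-- def countOperators(num: str, target: int) -> int:
--     """Iterative forward DP over digit boundaries: layers[k] maps a partial-expression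
--     state (running_sum, previous_value) at boundary k to how many partial expressions
--     reach it.  Seed with the first-number splits (no operator, prev = the number),
--     then fan each state out through the four operator transitions; finally sum the
--     counts of full-length states whose running sum equals target."""
--     n = len(num)
--
--     def splits(i):
--         # all (value, next_boundary) for a number starting at boundary i
--         out = []
--         for j in range(i, n):
--             if j > i and num[i] == '0':
--                 break
--             out.append((int(num[i:j + 1]), j + 1))
--         return out
--
--     if n == 0:
--         return 1 if target == 0 else 0
--
--     layers = [dict() for _ in range(n + 1)]
--     for v, k in splits(0):  # first number: no operator applied
--         st = (v, v)
--         layers[k][st] = layers[k].get(st, 0) + 1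
--     for i in range(1, n):
--         moves = splits(i)
--         for (s, p), c in layers[i].items():
--             for v, k in moves:
--                 for st in ((s + v, v), (s - v, -v), (s - p + p * v, p * v)):
--                     layers[k][st] = layers[k].get(st, 0) + c
--                 if v != 0 and p % v == 0:
--                     q = p // v
--                     st = (s - p + q, q)
--                     layers[k][st] = layers[k].get(st, 0) + c
--     return sum(c for (s, p), c in layers[n].items() if s == target)
-- ===== Notes on version B (the rewrite author's own statement) =====
-- stated objective: alternative
-- what changed: Replaces the top-down memoized recursion with an iterative bottom-up forward DP that keeps, for every digit boundary, a dict from (running_sum, previous_value) partial-expression states to counts, seeds it with the first-number splits and fans each state out through the four operator transitions, summing the counts of full states equal to target.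
import Mathlib
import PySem

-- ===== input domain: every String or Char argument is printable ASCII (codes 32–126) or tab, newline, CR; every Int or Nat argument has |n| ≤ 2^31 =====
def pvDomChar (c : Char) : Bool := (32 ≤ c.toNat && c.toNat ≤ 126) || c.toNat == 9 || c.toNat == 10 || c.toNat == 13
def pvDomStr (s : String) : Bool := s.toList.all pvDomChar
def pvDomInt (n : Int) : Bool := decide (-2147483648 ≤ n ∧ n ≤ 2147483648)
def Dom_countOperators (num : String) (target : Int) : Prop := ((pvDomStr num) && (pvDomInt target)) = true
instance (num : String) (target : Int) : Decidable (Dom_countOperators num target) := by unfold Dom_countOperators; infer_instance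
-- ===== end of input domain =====

-- B replaces A's top-down memoized recursion by an iterative forward DP over digit
-- boundaries (dict of (sum, prev) states per boundary); same values, not faster.

-- ===== PORT A =====
-- memo : dict[(index, current_sum, previous_value)] -> count, threaded through the recursion
abbrev MemoA := PySem.Dict (Int × Int × Int) Int

-- the inner 'for j in range(index, n)' loop of dfs (break on leading zero), threading the memo
def goA (num : List Char) (target : Int)
    (rec : Nat → Int → Int → MemoA → Int × MemoA) :
    Nat → Int → Int → List Nat → Int → MemoA → Int × MemoA
  | _, _, _, [], total, memo => (total, memo)
  | index, s, p, j :: js, total, memo =>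
    if decide (j > index) && ((PySem.List.pyGet? num (index : Int)).getD ' ' == '0') then
      (total, memo)  -- break
    else
      let v := (PySem.Int.ofChars? (PySem.List.slice num (some (index : Int)) (some ((j : Int) + 1)))).getD 0
      if index = 0 then
        let r := rec (j + 1) v v memo
        goA num target rec index s p js (total + r.1) r.2
      else
        let r1 := rec (j + 1) (s + v) v memo
        let r2 := rec (j + 1) (s - v) (-v) r1.2
        let r3 := rec (j + 1) (s - p + p * v) (p * v) r2.2
        if v ≠ 0 ∧ PySem.Int.mod p v = 0 then
          let r4 := rec (j + 1) (s - p + PySem.Int.floordiv p v) (PySem.Int.floordiv p v) r3.2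
          goA num target rec index s p js (total + r1.1 + r2.1 + r3.1 + r4.1) r4.2
        else
          goA num target rec index s p js (total + r1.1 + r2.1 + r3.1) r3.2

-- dfs(index, current_sum, previous_value); fuel only makes the recursion structural
-- (fuel > n - index always holds at every call, the fuel-0 branch is never reached)
def dfsA (num : List Char) (target : Int) : Nat → Nat → Int → Int → MemoA → Int × MemoA
  | 0, _, _, _, memo => (0, memo)
  | fuel + 1, index, s, p, memo =>
    if index = num.length then ((if s = target then 1 else 0), memo)
    else
      match memo.get? ((index : Int), s, p) with
      | some v => (v, memo)
      | none =>
        let r := goA num target (fun i' s' p' m' => dfsA num target fuel i' s' p' m')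
          index s p (List.range' index (num.length - index)) 0 memo
        (r.1, r.2.insert ((index : Int), s, p) r.1)

def countOperators (num : String) (target : Int) : Int :=
  (dfsA num.toList target (num.toList.length + 1) 0 0 0 PySem.Dict.empty).1

-- ===== PORT B =====
-- splits(i): the (value, next_boundary) pairs of numbers starting at boundary i (break on leading zero)
def splitsGo (num : List Char) (i : Nat) : List Nat → List (Int × Nat) → List (Int × Nat)
  | [], out => out
  | j :: js, out =>
    if decide (j > i) && ((PySem.List.pyGet? num (i : Int)).getD ' ' == '0') then out
    else splitsGo num i js
      (out ++ [((PySem.Int.ofChars? (PySem.List.slice num (some (i : Int)) (some ((j : Int) + 1)))).getD 0, j + 1)])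

def splitsB (num : List Char) (i : Nat) : List (Int × Nat) :=
  splitsGo num i (List.range' i (num.length - i)) []

-- layers[k][st] = layers[k].get(st, 0) + c
def bumpB (L : List (PySem.Dict (Int × Int) Int)) (k : Nat) (st : Int × Int) (c : Int) :
    List (PySem.Dict (Int × Int) Int) :=
  L.set k ((L.getD k PySem.Dict.empty).modify st 0 (· + c))

def countOperators_alt (num : String) (target : Int) : Int :=
  let cs := num.toList
  let n := cs.length
  if n = 0 then (if target = 0 then 1 else 0)
  else
    let L0 : List (PySem.Dict (Int × Int) Int) := List.replicate (n + 1) PySem.Dict.empty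
    -- first number: no operator, prev = the number itself
    let L1 := (splitsB cs 0).foldl (fun L vk => bumpB L vk.2 (vk.1, vk.1) 1) L0
    -- forward transitions through boundaries 1 .. n-1
    let L2 := (List.range' 1 (n - 1)).foldl (fun L i =>
      let moves := splitsB cs i
      ((L.getD i PySem.Dict.empty).items).foldl (fun L sc =>
        moves.foldl (fun L vk =>
          let s := sc.1.1; let p := sc.1.2; let c := sc.2
          let v := vk.1; let k := vk.2
          let L' := bumpB (bumpB (bumpB L k (s + v, v) c) k (s - v, -v) c) k (s - p + p * v, p * v) c
          if v ≠ 0 ∧ PySem.Int.mod p v = 0 then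
            bumpB L' k (s - p + PySem.Int.floordiv p v, PySem.Int.floordiv p v) c
          else L') L) L) L1
    (L2.getD n PySem.Dict.empty).items.foldl
      (fun acc sc => if sc.1.1 = target then acc + sc.2 else acc) 0

-- ===== PRECONDITION & SPEC =====
-- Pre_ excludes exactly the inputs on which A raises ValueError: int() of a substring
-- fails unless every character of num is a decimal digit (A returns normally iff so).
def Pre_countOperators (num : String) (target : Int) : Prop :=
  num.toList.all (fun c => c.isDigit) = true
instance (num : String) (target : Int) : Decidable (Pre_countOperators num target) := by
  unfold Pre_countOperators; infer_instance

def pvWitness_countOperators : String × Int := ("105", 5)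

def Spec_countOperators (num : String) (target : Int) (out : Int) : Prop := out = countOperators_alt num target
instance (num : String) (target : Int) (out : Int) : Decidable (Spec_countOperators num target out) := by unfold Spec_countOperators; infer_instance

-- ===== CLAIM (what is proved, stated in full; the proofs are below) =====
def Claim_equal_countOperators : Prop := ∀ (num : String) (target : Int), Dom_countOperators num target → Pre_countOperators num target → Spec_countOperators num target (countOperators num target)

-- ===== LEMMAS AND PROOFS =====

-- the split positions the break-loop actually processes: [i] on a leading zero, else all of i..n-1
def JsL (num : List Char) (i : Nat) : List Nat :=
  if h : i < num.length then
    (if num[i] = '0' then [i] else List.range' i (num.length - i))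
  else []

-- int(num[i:j+1])
def numV (num : List Char) (i j : Nat) : Int :=
  (PySem.Int.ofChars? (PySem.List.slice num (some (i : Int)) (some ((j : Int) + 1)))).getD 0

-- the mathematical value of dfs(i, s, p) (pure, no memo); fuel > n - i makes it exact
def FD (num : List Char) (target : Int) : Nat → Nat → Int → Int → Int
  | 0, _, _, _ => 0
  | fuel + 1, i, s, p =>
    if i = num.length then (if s = target then 1 else 0)
    else ((JsL num i).map (fun j =>
      if i = 0 then FD num target fuel (j + 1) (numV num i j) (numV num i j)
      else FD num target fuel (j + 1) (s + numV num i j) (numV num i j)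
        + FD num target fuel (j + 1) (s - numV num i j) (-numV num i j)
        + FD num target fuel (j + 1) (s - p + p * numV num i j) (p * numV num i j)
        + (if numV num i j ≠ 0 ∧ PySem.Int.mod p (numV num i j) = 0
           then FD num target fuel (j + 1) (s - p + PySem.Int.floordiv p (numV num i j)) (PySem.Int.floordiv p (numV num i j))
           else 0))).sum

def Fc (num : List Char) (target : Int) (i : Nat) (s p : Int) : Int :=
  FD num target (num.length + 1) i s p


theorem JsL_mem {num : List Char} {i j : Nat} (h : j ∈ JsL num i) :
    i ≤ j ∧ j < num.length := by
  unfold JsL at h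
  split at h
  · split at h
    · simp at h; omega
    · rw [List.mem_range'] at h; omega
  · simp at h

theorem FD_fuel (num : List Char) (target : Int) :
    ∀ f1 f2 i s p, num.length - i < f1 → num.length - i < f2 →
      FD num target f1 i s p = FD num target f2 i s p := by
  intro f1
  induction f1 with
  | zero => intro f2 i s p h1; omega
  | succ f1 ih =>
    intro f2 i s p h1 h2
    match f2, h2 with
    | f2 + 1, h2 =>
      simp only [FD]
      split
      · rfl
      · rename_i hne
        congr 1
        apply List.map_congr_left
        intro j hj
        have hm := JsL_mem hj
        have H : ∀ s' p', FD num target f1 (j + 1) s' p' = FD num target f2 (j + 1) s' p' :=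
          fun s' p' => ih f2 (j + 1) s' p' (by omega) (by omega)
        simp only [H]

theorem Fc_len (num : List Char) (target : Int) (s p : Int) :
    Fc num target num.length s p = (if s = target then 1 else 0) := by
  simp [Fc, FD]

theorem Fc_rec (num : List Char) (target : Int) (i : Nat) (s p : Int) (h : i ≠ num.length) :
    Fc num target i s p = ((JsL num i).map (fun j =>
      if i = 0 then Fc num target (j + 1) (numV num i j) (numV num i j)
      else Fc num target (j + 1) (s + numV num i j) (numV num i j)
        + Fc num target (j + 1) (s - numV num i j) (-numV num i j)
        + Fc num target (j + 1) (s - p + p * numV num i j) (p * numV num i j)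
        + (if numV num i j ≠ 0 ∧ PySem.Int.mod p (numV num i j) = 0
           then Fc num target (j + 1) (s - p + PySem.Int.floordiv p (numV num i j)) (PySem.Int.floordiv p (numV num i j))
           else 0))).sum := by
  unfold Fc
  conv_lhs => rw [FD]
  rw [if_neg h]
  congr 1
  apply List.map_congr_left
  intro j hj
  have hm := JsL_mem hj
  have H : ∀ s' p', FD num target num.length (j + 1) s' p'
      = FD num target (num.length + 1) (j + 1) s' p' :=
    fun s' p' => FD_fuel num target _ _ (j + 1) s' p' (by omega) (by omega)
  simp only [H]

-- the break-loop processes exactly JsL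
theorem takeWhile_eq_JsL (num : List Char) (i : Nat) :
    ((List.range' i (num.length - i)).takeWhile
      (fun j => !(decide (j > i) && ((PySem.List.pyGet? num (i : Int)).getD ' ' == '0')))) = JsL num i := by
  unfold JsL
  split
  · rename_i hi
    have hget : (PySem.List.pyGet? num (i : Int)).getD ' ' = num[i] := by
      simp [PySem.List.pyGet?, PySem.List.pyIdx?, hi]
    rw [hget]
    by_cases h0 : num[i] = '0'
    · simp only [h0]
      have hlen : num.length - i = (num.length - i - 1) + 1 := by omega
      rw [hlen, List.range'_succ, List.takeWhile_cons]
      simp only [gt_iff_lt, lt_self_iff_false, decide_false, Bool.false_and, Bool.not_false,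
        if_true]
      cases hc : num.length - i - 1 with
      | zero => simp
      | succ m =>
        rw [List.range'_succ, List.takeWhile_cons]
        simp
    · have hbe : (num[i] == '0') = false := by simpa using h0
      have : ∀ j ∈ List.range' i (num.length - i),
          (!(decide (j > i) && (num[i] == '0'))) = true := by
        intro j _
        simp [hbe]
      rw [List.takeWhile_eq_self_iff.mpr this]
      simp [h0]
  · rename_i hi
    have : num.length - i = 0 := by omega
    simp [this]

-- the per-split contribution used by Fc_rec
def termA (num : List Char) (target : Int) (i : Nat) (s p : Int) (j : Nat) : Int :=
  if i = 0 then Fc num target (j + 1) (numV num i j) (numV num i j)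
  else Fc num target (j + 1) (s + numV num i j) (numV num i j)
    + Fc num target (j + 1) (s - numV num i j) (-numV num i j)
    + Fc num target (j + 1) (s - p + p * numV num i j) (p * numV num i j)
    + (if numV num i j ≠ 0 ∧ PySem.Int.mod p (numV num i j) = 0
       then Fc num target (j + 1) (s - p + PySem.Int.floordiv p (numV num i j)) (PySem.Int.floordiv p (numV num i j))
       else 0)

theorem Fc_rec' (num : List Char) (target : Int) (i : Nat) (s p : Int) (h : i ≠ num.length) :
    Fc num target i s p = ((JsL num i).map (termA num target i s p)).sum := by
  rw [Fc_rec num target i s p h]; rfl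

-- every entry of the memo is a value of the pure dfs function
def ValidA (num : List Char) (target : Int) (memo : MemoA) : Prop :=
  ∀ (i : Nat) (s p v : Int), memo.get? ((i : Int), s, p) = some v → v = Fc num target i s p

theorem numV_def (num : List Char) (i j : Nat) :
    (PySem.Int.ofChars? (PySem.List.slice num (some (i : Int)) (some ((j : Int) + 1)))).getD 0
      = numV num i j := rfl

theorem goA_spec (num : List Char) (target : Int) (fuel : Nat)
    (rec : Nat → Int → Int → MemoA → Int × MemoA)
    (Hrec : ∀ i' s' p' m', num.length - i' < fuel → ValidA num target m' →
      (rec i' s' p' m').1 = Fc num target i' s' p' ∧ ValidA num target (rec i' s' p' m').2) :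
    ∀ (js : List Nat) (i : Nat) (s p tot : Int) (memo : MemoA),
      (∀ j ∈ js, i ≤ j ∧ j < num.length) → num.length - i ≤ fuel → ValidA num target memo →
      (goA num target rec i s p js tot memo).1
        = tot + ((js.takeWhile (fun j => !(decide (j > i) && ((PySem.List.pyGet? num (i : Int)).getD ' ' == '0')))).map
            (termA num target i s p)).sum
      ∧ ValidA num target (goA num target rec i s p js tot memo).2 := by
  intro js
  induction js with
  | nil => intro i s p tot memo hjs hfb hv; simp [goA, hv]
  | cons j js ih =>
    intro i s p tot memo hjs hfb hv
    have hj := hjs j (by simp)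
    have hjs' : ∀ x ∈ js, i ≤ x ∧ x < num.length := fun x hx => hjs x (by simp [hx])
    have hbnd : num.length - (j + 1) < fuel := by omega
    rw [goA, List.takeWhile_cons]
    by_cases hbrk : (decide (j > i) && ((PySem.List.pyGet? num (i : Int)).getD ' ' == '0')) = true
    · simp only [hbrk, Bool.not_true, if_true]
      exact ⟨by simp, hv⟩
    · rw [Bool.not_eq_true] at hbrk
      simp only [hbrk, Bool.false_eq_true, if_false, Bool.not_false, reduceIte, numV_def]
      by_cases hi0 : i = 0
      · subst hi0
        simp only [reduceIte]
        set r1 := rec (j + 1) (numV num 0 j) (numV num 0 j) memo with hr1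
        obtain ⟨e1, v1⟩ := Hrec (j + 1) (numV num 0 j) (numV num 0 j) memo hbnd hv
        obtain ⟨hg, hgv⟩ := ih 0 s p (tot + r1.1) r1.2 hjs' hfb (hr1 ▸ v1)
        refine ⟨?_, hgv⟩
        rw [hg, List.map_cons, List.sum_cons]
        have ht : termA num target 0 s p j = Fc num target (j + 1) (numV num 0 j) (numV num 0 j) := by
          simp [termA]
        rw [ht, hr1, e1]
        ring
      · simp only [if_neg hi0]
        set r1 := rec (j + 1) (s + numV num i j) (numV num i j) memo with hr1
        obtain ⟨e1, v1⟩ := Hrec (j + 1) (s + numV num i j) (numV num i j) memo hbnd hv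
        set r2 := rec (j + 1) (s - numV num i j) (-numV num i j) r1.2 with hr2
        obtain ⟨e2, v2⟩ := Hrec (j + 1) (s - numV num i j) (-numV num i j) r1.2 hbnd (hr1 ▸ v1)
        set r3 := rec (j + 1) (s - p + p * numV num i j) (p * numV num i j) r2.2 with hr3
        obtain ⟨e3, v3⟩ := Hrec (j + 1) (s - p + p * numV num i j) (p * numV num i j) r2.2 hbnd (hr2 ▸ v2)
        have htm : termA num target i s p j
            = Fc num target (j + 1) (s + numV num i j) (numV num i j)
            + Fc num target (j + 1) (s - numV num i j) (-numV num i j)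
            + Fc num target (j + 1) (s - p + p * numV num i j) (p * numV num i j)
            + (if numV num i j ≠ 0 ∧ PySem.Int.mod p (numV num i j) = 0
               then Fc num target (j + 1) (s - p + PySem.Int.floordiv p (numV num i j)) (PySem.Int.floordiv p (numV num i j))
               else 0) := by
          simp [termA, hi0]
        by_cases hdiv : numV num i j ≠ 0 ∧ PySem.Int.mod p (numV num i j) = 0
        · simp only [if_pos hdiv]
          set r4 := rec (j + 1) (s - p + PySem.Int.floordiv p (numV num i j)) (PySem.Int.floordiv p (numV num i j)) r3.2 with hr4
          obtain ⟨e4, v4⟩ := Hrec (j + 1) (s - p + PySem.Int.floordiv p (numV num i j)) (PySem.Int.floordiv p (numV num i j)) r3.2 hbnd (hr3 ▸ v3)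
          obtain ⟨hg, hgv⟩ := ih i s p (tot + r1.1 + r2.1 + r3.1 + r4.1) r4.2 hjs' hfb (hr4 ▸ v4)
          refine ⟨?_, hgv⟩
          rw [hg, List.map_cons, List.sum_cons, htm, if_pos hdiv,
            hr1, e1, hr2, e2, hr3, e3, hr4, e4]
          ring
        · simp only [if_neg hdiv]
          obtain ⟨hg, hgv⟩ := ih i s p (tot + r1.1 + r2.1 + r3.1) r3.2 hjs' hfb (hr3 ▸ v3)
          refine ⟨?_, hgv⟩
          rw [hg, List.map_cons, List.sum_cons, htm, if_neg hdiv,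
            hr1, e1, hr2, e2, hr3, e3]
          ring

theorem dfsA_spec (num : List Char) (target : Int) :
    ∀ (fuel : Nat) (i : Nat) (s p : Int) (memo : MemoA),
      num.length - i < fuel → ValidA num target memo →
      (dfsA num target fuel i s p memo).1 = Fc num target i s p
        ∧ ValidA num target (dfsA num target fuel i s p memo).2 := by
  intro fuel
  induction fuel with
  | zero => intro i s p memo h; omega
  | succ fuel ih =>
    intro i s p memo hb hv
    rw [dfsA]
    by_cases hi : i = num.length
    · subst hi
      rw [if_pos rfl]
      exact ⟨(Fc_len num target s p).symm, hv⟩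
    · simp only [if_neg hi]
      cases hget : PySem.Dict.get? memo ((i : Int), s, p) with
      | some v =>
        exact ⟨hv i s p v hget, hv⟩
      | none =>
        simp only []
        have hjs : ∀ j ∈ List.range' i (num.length - i), i ≤ j ∧ j < num.length := by
          intro j hj; rw [List.mem_range'] at hj; omega
        obtain ⟨hg, hgv⟩ := goA_spec num target fuel _
          (fun i' s' p' m' hb' hv' => ih i' s' p' m' hb' hv')
          (List.range' i (num.length - i)) i s p 0 memo hjs (by omega) hv
        constructor
        · rw [hg, takeWhile_eq_JsL, ← Fc_rec' num target i s p hi]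
          ring
        · intro i' s' p' v' hq
          rw [PySem.Dict.get?_insert] at hq
          split at hq
          · rename_i heq
            have h1 : (i' : Int) = (i : Int) ∧ s' = s ∧ p' = p := by
              constructor
              · exact congrArg Prod.fst heq
              · exact ⟨congrArg (fun x => x.2.1) heq, congrArg (fun x => x.2.2) heq⟩
            obtain ⟨hii, hss, hpp⟩ := h1
            have hi'' : i' = i := by exact_mod_cast hii
            rw [hi'', hss, hpp]
            cases hq
            rw [hg, takeWhile_eq_JsL, ← Fc_rec' num target i s p hi]
            ring
          · exact hgv i' s' p' v' hq

theorem countOperators_eq_Fc (num : String) (target : Int) :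
    countOperators num target = Fc num.toList target 0 0 0 := by
  unfold countOperators
  exact (dfsA_spec num.toList target (num.toList.length + 1) 0 0 0 PySem.Dict.empty
    (by omega) (by intro i s p v h; simp [PySem.Dict.get?_empty] at h)).1

-- ===== B side =====

theorem splitsGo_spec (num : List Char) (i : Nat) :
    ∀ (js : List Nat) (out : List (Int × Nat)),
      splitsGo num i js out
        = out ++ ((js.takeWhile (fun j => !(decide (j > i) && ((PySem.List.pyGet? num (i : Int)).getD ' ' == '0')))).map
            (fun j => (numV num i j, j + 1))) := by
  intro js
  induction js with
  | nil => intro out; simp [splitsGo]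
  | cons j js ih =>
    intro out
    rw [splitsGo, List.takeWhile_cons]
    by_cases hbrk : (decide (j > i) && ((PySem.List.pyGet? num (i : Int)).getD ' ' == '0')) = true
    · simp only [hbrk, Bool.not_true, reduceIte]
      simp
    · rw [Bool.not_eq_true] at hbrk
      simp only [hbrk, Bool.false_eq_true, if_false, Bool.not_false, reduceIte, numV_def]
      rw [ih]
      simp

theorem splitsB_eq (num : List Char) (i : Nat) :
    splitsB num i = (JsL num i).map (fun j => (numV num i j, j + 1)) := by
  unfold splitsB
  rw [splitsGo_spec, takeWhile_eq_JsL]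
  simp

-- changing a nodup list's summand at one member
theorem sum_map_change {α : Type} [DecidableEq α] :
    ∀ (l : List α) (g g' : α → Int) (a : α), l.Nodup → a ∈ l →
      (∀ x ∈ l, x ≠ a → g' x = g x) →
      (l.map g').sum = (l.map g).sum + (g' a - g a) := by
  intro l
  induction l with
  | nil => intro g g' a _ ha; simp at ha
  | cons x t ih =>
    intro g g' a hnd ha hgg
    rw [List.nodup_cons] at hnd
    rcases List.mem_cons.mp ha with rfl | hat
    · have : ∀ y ∈ t, g' y = g y := fun y hy => hgg y (by simp [hy]) (fun hya => hnd.1 (hya ▸ hy))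
      simp only [List.map_cons, List.sum_cons, List.map_congr_left this]
      ring
    · have hxa : x ≠ a := fun hxa => hnd.1 (hxa ▸ hat)
      rw [List.map_cons, List.sum_cons, List.map_cons, List.sum_cons, hgg x (by simp) hxa,
        ih g g' a hnd.2 hat (fun y hy hya => hgg y (by simp [hy]) hya)]
      ring

-- weighted value of one boundary dict: Σ count * Fc
def wB (num : List Char) (target : Int) (i : Nat) (d : PySem.Dict (Int × Int) Int) : Int :=
  (d.items.map (fun sc => sc.2 * Fc num target i sc.1.1 sc.1.2)).sum

theorem nodup_keys_modify {d : PySem.Dict (Int × Int) Int} (st : Int × Int) (c : Int)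
    (h : d.keys.Nodup) : (d.modify st 0 (· + c)).keys.Nodup := by
  rw [PySem.Dict.keys_modify]
  exact PySem.Dict.nodup_keys_insert _ _ _ h

theorem wB_modify (num : List Char) (target : Int) (i : Nat)
    (d : PySem.Dict (Int × Int) Int) (st : Int × Int) (c : Int) (hnd : d.keys.Nodup) :
    wB num target i (d.modify st 0 (· + c)) = wB num target i d + c * Fc num target i st.1 st.2 := by
  have hnd' := nodup_keys_modify st c hnd
  unfold wB
  rw [PySem.Dict.items_eq_map_keys _ hnd' 0, PySem.Dict.items_eq_map_keys _ hnd 0,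
    List.map_map, List.map_map, PySem.Dict.keys_modify]
  simp only [Function.comp_def]
  by_cases hc : d.contains st = true
  · rw [PySem.Dict.keys_insert_of_contains _ _ hc]
    rw [sum_map_change d.keys
      (fun k => (d.getD k 0) * Fc num target i k.1 k.2)
      (fun k => ((d.modify st 0 (· + c)).getD k 0) * Fc num target i k.1 k.2) st hnd
      ((PySem.Dict.contains_iff_mem_keys d st).mp hc)
      (fun x _ hxa => by simp [PySem.Dict.getD_modify, hxa])]
    rw [PySem.Dict.getD_modify, if_pos rfl]
    ring
  · rw [Bool.not_eq_true] at hc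
    rw [PySem.Dict.keys_insert_of_not_contains _ _ hc]
    rw [List.map_append, List.sum_append]
    simp only [List.map_singleton, List.sum_singleton]
    have hst : st ∉ d.keys := fun hm =>
      by rw [(PySem.Dict.contains_iff_mem_keys d st).mpr hm] at hc; cases hc
    have : ∀ x ∈ d.keys, ((d.modify st 0 (· + c)).getD x 0) * Fc num target i x.1 x.2
        = (d.getD x 0) * Fc num target i x.1 x.2 := by
      intro x hx
      rw [PySem.Dict.getD_modify, if_neg (fun (h : x = st) => hst (h ▸ hx))]
    rw [List.map_congr_left this, PySem.Dict.getD_modify, if_pos rfl,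
      PySem.Dict.getD_of_not_contains _ _ hc]
    ring

-- layers invariant: right length, every dict has nodup keys
def LIB (num : List Char) (L : List (PySem.Dict (Int × Int) Int)) : Prop :=
  L.length = num.length + 1 ∧ ∀ d ∈ L, d.keys.Nodup

theorem list_getD_set_ne {α : Type} (L : List α) (k t : Nat) (d' e : α) (h : t ≠ k) :
    (L.set k d').getD t e = L.getD t e := by
  have hkt : ¬ k = t := fun hh => h hh.symm
  simp [List.getD_eq_getElem?_getD, hkt]

theorem list_getD_set_self {α : Type} (L : List α) (k : Nat) (d' e : α) (hk : k < L.length) :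
    (L.set k d').getD k e = d' := by
  simp [List.getD_eq_getElem?_getD, hk]

theorem LIB_getD_nodup {num : List Char} {L : List (PySem.Dict (Int × Int) Int)}
    (hL : LIB num L) (k : Nat) : ((L.getD k PySem.Dict.empty)).keys.Nodup := by
  rcases Nat.lt_or_ge k L.length with hk | hk
  · rw [List.getD_eq_getElem?_getD, List.getElem?_eq_getElem hk]
    exact hL.2 _ (List.getElem_mem hk)
  · rw [List.getD_eq_getElem?_getD, List.getElem?_eq_none hk]
    exact PySem.Dict.nodup_keys_empty

theorem LIB_bump {num : List Char} {L : List (PySem.Dict (Int × Int) Int)}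
    (hL : LIB num L) (k : Nat) (st : Int × Int) (c : Int) : LIB num (bumpB L k st c) := by
  refine ⟨by rw [bumpB, List.length_set]; exact hL.1, ?_⟩
  intro d hd
  rcases List.mem_or_eq_of_mem_set hd with hm | rfl
  · exact hL.2 d hm
  · exact nodup_keys_modify st c (LIB_getD_nodup hL k)

-- total weighted value of boundaries lo..n
def PhiB (num : List Char) (target : Int) (L : List (PySem.Dict (Int × Int) Int)) (lo : Nat) : Int :=
  ((List.range' lo (num.length + 1 - lo)).map
    (fun k => wB num target k (L.getD k PySem.Dict.empty))).sum

theorem PhiB_top (num : List Char) (target : Int) (L : List (PySem.Dict (Int × Int) Int)) :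
    PhiB num target L (num.length + 1) = 0 := by
  simp [PhiB]

theorem PhiB_cons (num : List Char) (target : Int) (L : List (PySem.Dict (Int × Int) Int))
    (lo : Nat) (hlo : lo ≤ num.length) :
    PhiB num target L lo
      = wB num target lo (L.getD lo PySem.Dict.empty) + PhiB num target L (lo + 1) := by
  unfold PhiB
  have h1 : num.length + 1 - lo = (num.length - lo) + 1 := by omega
  have h2 : num.length + 1 - (lo + 1) = num.length - lo := by omega
  rw [h1, h2, List.range'_succ, List.map_cons, List.sum_cons]

theorem PhiB_bump (num : List Char) (target : Int) {L : List (PySem.Dict (Int × Int) Int)}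
    (hL : LIB num L) (lo k : Nat) (st : Int × Int) (c : Int)
    (hlo : lo ≤ k) (hk : k ≤ num.length) :
    PhiB num target (bumpB L k st c) lo
      = PhiB num target L lo + c * Fc num target k st.1 st.2 := by
  unfold PhiB bumpB
  rw [sum_map_change (List.range' lo (num.length + 1 - lo))
    (fun t => wB num target t (L.getD t PySem.Dict.empty))
    (fun t => wB num target t ((L.set k ((L.getD k PySem.Dict.empty).modify st 0 (· + c))).getD t PySem.Dict.empty))
    k (List.nodup_range' 1) (by rw [List.mem_range'_1]; omega)
    (fun t _ htk => by simp only [list_getD_set_ne _ k t _ _ htk])]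
  rw [list_getD_set_self _ _ _ _ (by rw [hL.1]; omega),
    wB_modify num target k _ st c (LIB_getD_nodup hL k)]
  ring

theorem wB_empty (num : List Char) (target : Int) (k : Nat) :
    wB num target k PySem.Dict.empty = 0 := rfl

-- seed loop: one partial expression per first-number split
theorem seed_spec (num : List Char) (target : Int) :
    ∀ (sp : List (Int × Nat)) (L : List (PySem.Dict (Int × Int) Int)), LIB num L →
      (∀ vk ∈ sp, 1 ≤ vk.2 ∧ vk.2 ≤ num.length) →
      LIB num (sp.foldl (fun L vk => bumpB L vk.2 (vk.1, vk.1) 1) L)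
      ∧ PhiB num target (sp.foldl (fun L vk => bumpB L vk.2 (vk.1, vk.1) 1) L) 1
          = PhiB num target L 1 + (sp.map (fun vk => Fc num target vk.2 vk.1 vk.1)).sum := by
  intro sp
  induction sp with
  | nil => intro L hL _; exact ⟨by simpa using hL, by simp⟩
  | cons vk sp ih =>
    intro L hL hb
    have hvk := hb vk (by simp)
    obtain ⟨ih1, ih2⟩ := ih (bumpB L vk.2 (vk.1, vk.1) 1) (LIB_bump hL _ _ _)
      (fun x hx => hb x (by simp [hx]))
    refine ⟨by simpa using ih1, ?_⟩
    rw [List.foldl_cons, ih2, PhiB_bump num target hL 1 vk.2 (vk.1, vk.1) 1 hvk.1 hvk.2,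
      List.map_cons, List.sum_cons]
    ring

-- one state (sc) fanned out through all splits at boundary i (the inner loop, lets zeta-reduced)
def stepMv (sc : (Int × Int) × Int) (L : List (PySem.Dict (Int × Int) Int)) (vk : Int × Nat) :
    List (PySem.Dict (Int × Int) Int) :=
  if vk.1 ≠ 0 ∧ PySem.Int.mod sc.1.2 vk.1 = 0 then
    bumpB (bumpB (bumpB (bumpB L vk.2 (sc.1.1 + vk.1, vk.1) sc.2) vk.2 (sc.1.1 - vk.1, -vk.1) sc.2)
        vk.2 (sc.1.1 - sc.1.2 + sc.1.2 * vk.1, sc.1.2 * vk.1) sc.2)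
      vk.2 (sc.1.1 - sc.1.2 + PySem.Int.floordiv sc.1.2 vk.1, PySem.Int.floordiv sc.1.2 vk.1) sc.2
  else
    bumpB (bumpB (bumpB L vk.2 (sc.1.1 + vk.1, vk.1) sc.2) vk.2 (sc.1.1 - vk.1, -vk.1) sc.2)
      vk.2 (sc.1.1 - sc.1.2 + sc.1.2 * vk.1, sc.1.2 * vk.1) sc.2

theorem inner_spec (num : List Char) (target : Int) (i : Nat) (sc : (Int × Int) × Int) :
    ∀ (sp : List (Int × Nat)) (L : List (PySem.Dict (Int × Int) Int)), LIB num L →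
      (∀ vk ∈ sp, i + 1 ≤ vk.2 ∧ vk.2 ≤ num.length) →
      LIB num (sp.foldl (stepMv sc) L)
      ∧ PhiB num target (sp.foldl (stepMv sc) L) (i + 1)
          = PhiB num target L (i + 1)
            + sc.2 * (sp.map (fun vk =>
                Fc num target vk.2 (sc.1.1 + vk.1) vk.1
                + Fc num target vk.2 (sc.1.1 - vk.1) (-vk.1)
                + Fc num target vk.2 (sc.1.1 - sc.1.2 + sc.1.2 * vk.1) (sc.1.2 * vk.1)
                + (if vk.1 ≠ 0 ∧ PySem.Int.mod sc.1.2 vk.1 = 0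
                   then Fc num target vk.2 (sc.1.1 - sc.1.2 + PySem.Int.floordiv sc.1.2 vk.1)
                          (PySem.Int.floordiv sc.1.2 vk.1)
                   else 0))).sum := by
  intro sp
  induction sp with
  | nil => intro L hL _; exact ⟨by simpa using hL, by simp⟩
  | cons vk sp ih =>
    intro L hL hb
    have hvk := hb vk (by simp)
    have hstep : LIB num (stepMv sc L vk) ∧ PhiB num target (stepMv sc L vk) (i + 1)
        = PhiB num target L (i + 1)
          + sc.2 * (Fc num target vk.2 (sc.1.1 + vk.1) vk.1
            + Fc num target vk.2 (sc.1.1 - vk.1) (-vk.1)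
            + Fc num target vk.2 (sc.1.1 - sc.1.2 + sc.1.2 * vk.1) (sc.1.2 * vk.1)
            + (if vk.1 ≠ 0 ∧ PySem.Int.mod sc.1.2 vk.1 = 0
               then Fc num target vk.2 (sc.1.1 - sc.1.2 + PySem.Int.floordiv sc.1.2 vk.1)
                      (PySem.Int.floordiv sc.1.2 vk.1)
               else 0)) := by
      unfold stepMv
      by_cases hdiv : vk.1 ≠ 0 ∧ PySem.Int.mod sc.1.2 vk.1 = 0
      · simp only [if_pos hdiv]
        have h1 := LIB_bump hL vk.2 (sc.1.1 + vk.1, vk.1) sc.2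
        have h2 := LIB_bump h1 vk.2 (sc.1.1 - vk.1, -vk.1) sc.2
        have h3 := LIB_bump h2 vk.2 (sc.1.1 - sc.1.2 + sc.1.2 * vk.1, sc.1.2 * vk.1) sc.2
        refine ⟨LIB_bump h3 _ _ _, ?_⟩
        rw [PhiB_bump num target h3 (i+1) vk.2 _ sc.2 hvk.1 hvk.2,
            PhiB_bump num target h2 (i+1) vk.2 _ sc.2 hvk.1 hvk.2,
            PhiB_bump num target h1 (i+1) vk.2 _ sc.2 hvk.1 hvk.2,
            PhiB_bump num target hL (i+1) vk.2 _ sc.2 hvk.1 hvk.2]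
        ring
      · simp only [if_neg hdiv]
        have h1 := LIB_bump hL vk.2 (sc.1.1 + vk.1, vk.1) sc.2
        have h2 := LIB_bump h1 vk.2 (sc.1.1 - vk.1, -vk.1) sc.2
        refine ⟨LIB_bump h2 _ _ _, ?_⟩
        rw [PhiB_bump num target h2 (i+1) vk.2 _ sc.2 hvk.1 hvk.2,
            PhiB_bump num target h1 (i+1) vk.2 _ sc.2 hvk.1 hvk.2,
            PhiB_bump num target hL (i+1) vk.2 _ sc.2 hvk.1 hvk.2]
        ring
    obtain ⟨ih1, ih2⟩ := ih (stepMv sc L vk) hstep.1 (fun x hx => hb x (by simp [hx]))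
    refine ⟨by simpa using ih1, ?_⟩
    rw [List.foldl_cons, ih2, hstep.2, List.map_cons, List.sum_cons]
    ring

-- all states of boundary i expanded (the middle loop)
theorem items_spec (num : List Char) (target : Int) (i : Nat) (hi0 : i ≠ 0) (hin : i ≠ num.length) :
    ∀ (its : List ((Int × Int) × Int)) (L : List (PySem.Dict (Int × Int) Int)), LIB num L →
      LIB num (its.foldl (fun L sc => (splitsB num i).foldl (stepMv sc) L) L)
      ∧ PhiB num target (its.foldl (fun L sc => (splitsB num i).foldl (stepMv sc) L) L) (i + 1)
          = PhiB num target L (i + 1)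
            + (its.map (fun sc => sc.2 * Fc num target i sc.1.1 sc.1.2)).sum := by
  intro its
  induction its with
  | nil => intro L hL; exact ⟨by simpa using hL, by simp⟩
  | cons sc its ih =>
    intro L hL
    have hbnds : ∀ vk ∈ splitsB num i, i + 1 ≤ vk.2 ∧ vk.2 ≤ num.length := by
      intro vk hvk
      rw [splitsB_eq] at hvk
      obtain ⟨j, hj, rfl⟩ := List.mem_map.mp hvk
      have := JsL_mem hj
      simp; omega
    obtain ⟨h1, h2⟩ := inner_spec num target i sc (splitsB num i) L hL hbnds
    obtain ⟨ih1, ih2⟩ := ih ((splitsB num i).foldl (stepMv sc) L) h1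
    refine ⟨by simpa using ih1, ?_⟩
    rw [List.foldl_cons, ih2, h2, List.map_cons, List.sum_cons]
    have hsum : ((splitsB num i).map (fun vk =>
        Fc num target vk.2 (sc.1.1 + vk.1) vk.1
        + Fc num target vk.2 (sc.1.1 - vk.1) (-vk.1)
        + Fc num target vk.2 (sc.1.1 - sc.1.2 + sc.1.2 * vk.1) (sc.1.2 * vk.1)
        + (if vk.1 ≠ 0 ∧ PySem.Int.mod sc.1.2 vk.1 = 0
           then Fc num target vk.2 (sc.1.1 - sc.1.2 + PySem.Int.floordiv sc.1.2 vk.1)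
                  (PySem.Int.floordiv sc.1.2 vk.1)
           else 0))).sum = Fc num target i sc.1.1 sc.1.2 := by
      rw [splitsB_eq, List.map_map, Fc_rec' num target i sc.1.1 sc.1.2 hin]
      congr 1
      apply List.map_congr_left
      intro j hj
      simp only [Function.comp_def, termA, if_neg hi0]
    rw [hsum]
    ring

-- outer loop over boundaries 1 .. n-1
theorem outer_spec (num : List Char) (target : Int) :
    ∀ (m i : Nat) (L : List (PySem.Dict (Int × Int) Int)), LIB num L → 1 ≤ i →
      i + m = num.length →
      LIB num ((List.range' i m).foldl
        (fun L i => ((L.getD i PySem.Dict.empty).items).foldl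
          (fun L sc => (splitsB num i).foldl (stepMv sc) L) L) L)
      ∧ PhiB num target ((List.range' i m).foldl
          (fun L i => ((L.getD i PySem.Dict.empty).items).foldl
            (fun L sc => (splitsB num i).foldl (stepMv sc) L) L) L) num.length
        = PhiB num target L i := by
  intro m
  induction m with
  | zero =>
    intro i L hL _ hi
    simp only [List.range'_zero, List.foldl_nil]
    have hi' : i = num.length := by omega
    subst hi'
    exact ⟨hL, rfl⟩
  | succ m ih =>
    intro i L hL h1 hi
    rw [List.range'_succ, List.foldl_cons]
    obtain ⟨hs1, hs2⟩ := items_spec num target i (by omega) (by omega)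
      ((L.getD i PySem.Dict.empty).items) L hL
    obtain ⟨ih1, ih2⟩ := ih (i + 1)
      (((L.getD i PySem.Dict.empty).items).foldl
        (fun L sc => (splitsB num i).foldl (stepMv sc) L) L) hs1 (by omega) (by omega)
    refine ⟨ih1, ?_⟩
    rw [ih2, hs2, ← wB]
    rw [PhiB_cons num target L i (by omega)]
    ring

theorem final_fold (num : List Char) (target : Int) (d : PySem.Dict (Int × Int) Int) :
    d.items.foldl (fun acc sc => if sc.1.1 = target then acc + sc.2 else acc) 0
      = wB num target num.length d := by
  have h := PySem.List.foldl_congr_mem (l := d.items) (init := (0 : Int))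
    (f := fun acc (sc : (Int × Int) × Int) => if sc.1.1 = target then acc + sc.2 else acc)
    (g := fun acc (sc : (Int × Int) × Int) => acc + (if sc.1.1 = target then sc.2 else 0))
    (by
      intro acc sc _
      show (if sc.1.1 = target then acc + sc.2 else acc) = acc + (if sc.1.1 = target then sc.2 else 0)
      split <;> ring)
  rw [h, PySem.List.foldl_add d.items (fun sc => if sc.1.1 = target then sc.2 else 0) 0, zero_add]
  unfold wB
  congr 1
  apply List.map_congr_left
  intro sc _
  rw [Fc_len]
  split <;> ring

theorem alt_eq (num : String) (target : Int) :
    countOperators_alt num target = Fc num.toList target 0 0 0 := by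
  by_cases hn : num.toList.length = 0
  · have h2 : Fc num.toList target 0 0 0 = (if (0 : Int) = target then 1 else 0) := by
      conv_lhs => rw [show (0 : Nat) = num.toList.length from hn.symm]
      rw [Fc_len]
    simp only [countOperators_alt]
    rw [if_pos hn, h2]
    by_cases ht : target = 0
    · simp [ht]
    · rw [if_neg ht, if_neg (fun (h : (0 : Int) = target) => ht h.symm)]
  · have hn1 : 1 ≤ num.toList.length := by omega
    have hL0 : LIB num.toList (List.replicate (num.toList.length + 1) PySem.Dict.empty) := by
      refine ⟨by simp, ?_⟩
      intro d hd
      rw [List.eq_of_mem_replicate hd]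
      exact PySem.Dict.nodup_keys_empty
    have hPhi0 : PhiB num.toList target
        (List.replicate (num.toList.length + 1) PySem.Dict.empty) 1 = 0 := by
      unfold PhiB
      apply List.sum_eq_zero
      intro x hx
      obtain ⟨k, _, rfl⟩ := List.mem_map.mp hx
      have hgd : (List.replicate (num.toList.length + 1)
            (PySem.Dict.empty : PySem.Dict (Int × Int) Int)).getD k PySem.Dict.empty
          = PySem.Dict.empty := by
        rw [List.getD_eq_getElem?_getD, List.getElem?_replicate]
        split <;> rfl
      rw [hgd, wB_empty]
    have hsp : ∀ vk ∈ splitsB num.toList 0, 1 ≤ vk.2 ∧ vk.2 ≤ num.toList.length := by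
      intro vk hvk
      rw [splitsB_eq] at hvk
      obtain ⟨j, hj, rfl⟩ := List.mem_map.mp hvk
      have := JsL_mem hj
      show 1 ≤ j + 1 ∧ j + 1 ≤ num.toList.length
      omega
    obtain ⟨hL1, hP1⟩ := seed_spec num.toList target (splitsB num.toList 0) _ hL0 hsp
    have hP1' : PhiB num.toList target
        ((splitsB num.toList 0).foldl (fun L vk => bumpB L vk.2 (vk.1, vk.1) 1)
          (List.replicate (num.toList.length + 1) PySem.Dict.empty)) 1
        = Fc num.toList target 0 0 0 := by
      rw [hP1, hPhi0, zero_add, splitsB_eq, List.map_map,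
        Fc_rec' num.toList target 0 0 0 (by omega)]
      rfl
    obtain ⟨hL2, hP2⟩ := outer_spec num.toList target (num.toList.length - 1) 1 _ hL1
      (le_refl 1) (by omega)
    have hcons := PhiB_cons num.toList target
      ((List.range' 1 (num.toList.length - 1)).foldl
        (fun L i => ((L.getD i PySem.Dict.empty).items).foldl
          (fun L sc => (splitsB num.toList i).foldl (stepMv sc) L) L)
        ((splitsB num.toList 0).foldl (fun L vk => bumpB L vk.2 (vk.1, vk.1) 1)
          (List.replicate (num.toList.length + 1) PySem.Dict.empty)))
      num.toList.length (le_refl _)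
    rw [PhiB_top, hP2, hP1'] at hcons
    have key : ((((List.range' 1 (num.toList.length - 1)).foldl
        (fun L i => ((L.getD i PySem.Dict.empty).items).foldl
          (fun L sc => (splitsB num.toList i).foldl (stepMv sc) L) L)
        ((splitsB num.toList 0).foldl (fun L vk => bumpB L vk.2 (vk.1, vk.1) 1)
          (List.replicate (num.toList.length + 1) PySem.Dict.empty))).getD
            num.toList.length PySem.Dict.empty).items.foldl
        (fun acc sc => if sc.1.1 = target then acc + sc.2 else acc) 0)
        = Fc num.toList target 0 0 0 := by
      rw [final_fold num.toList target]
      linarith [hcons]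
    simp only [countOperators_alt]
    rw [if_neg hn]
    exact key


-- ===== VERDICT (by name: the statement is the Claim_ definition above) =====
theorem countOperators_spec : Claim_equal_countOperators := by
  intro num target _ _
  unfold Spec_countOperators
  rw [countOperators_eq_Fc, alt_eq]
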